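-- pv_equiv track=rewrite | github.com/Mifuxuanan/LELA71000_Transformers-Recognise-QD | Dataset_constructions/built_datasets/fol2nl/fol2nl_generation.py | replace_order
-- ===== SOURCE A (Python) =====
-- def replace_order(step, sym, div, full_vars, used_set, exclude):
--     total = step.count(sym)
--     n_group = total // div
--     for _ in range(n_group+1):
--         if exclude:
--             choices = [v for v in full_vars if v not in used_set]
--         else:
--             choices = full_vars
--         if not choices:
--             choices = "x"
--         pick = choices[0]
--         if exclude:
--             used_set.add(pick)
--         step = step.replace(sym, pick, div)
--     return step, used_set
-- ===== SOURCE B (Python) =====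
-- def replace_order(step, sym, div, full_vars, used_set, exclude):
--     n = step.count(sym) // div + 1
--     if n <= 0:
--         return step, used_set
--     if exclude:
--         seen = set(used_set)
--         fresh = []
--         for v in full_vars:
--             if v not in seen:
--                 seen.add(v)
--                 fresh.append(v)
--         picks = fresh[:n] + ["x"] * (n - len(fresh))
--         used_set.update(picks)
--     else:
--         picks = [full_vars[0] if full_vars else "x"] * n
--     for p in picks:
--         step = p.join(step.split(sym, div))
--     return step, used_set
-- ===== Notes on version B (the rewrite author's own statement) =====
-- stated objective: alternative
-- what changed: A rescans full_vars to rebuild the choices list in every loop round and replaces via str.replace; B scans full_vars once to precompute the whole pick sequence (fresh variables in order, then 'x' padding), batch-updates the used set, and performs each count-limited replacement by splitting at the first div occurrences and joining with the pick (split+join instead of replace, no per-round full_vars scan).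
-- outside the precondition, e.g. on replace_order('ab', '', 1, ['u'], set(), False): A returns ('uuuuab', set()), B raises ValueError
import Mathlib
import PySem

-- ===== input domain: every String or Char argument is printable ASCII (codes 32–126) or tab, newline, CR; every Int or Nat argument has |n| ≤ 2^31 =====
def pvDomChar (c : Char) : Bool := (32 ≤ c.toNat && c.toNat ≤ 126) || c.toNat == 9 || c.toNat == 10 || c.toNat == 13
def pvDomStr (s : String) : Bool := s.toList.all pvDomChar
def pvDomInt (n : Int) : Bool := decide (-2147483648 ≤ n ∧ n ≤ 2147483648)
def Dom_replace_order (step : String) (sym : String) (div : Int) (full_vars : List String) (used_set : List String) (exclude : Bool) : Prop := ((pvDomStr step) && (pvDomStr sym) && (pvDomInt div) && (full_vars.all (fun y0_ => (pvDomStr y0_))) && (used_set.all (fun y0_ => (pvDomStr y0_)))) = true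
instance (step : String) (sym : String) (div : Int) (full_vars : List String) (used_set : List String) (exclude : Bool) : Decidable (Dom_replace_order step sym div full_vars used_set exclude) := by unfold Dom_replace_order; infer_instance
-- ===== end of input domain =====

-- B precomputes the whole pick sequence in one scan of full_vars and does each
-- count-limited replacement by split-at-first-div-occurrences + join; the RETURN
-- value is proved identical on Pre_ (div ≠ 0, sym ≠ ""). A mutates used_set in
-- place; B performs the analogous in-place update in Python.


-- ===== PORT A =====
-- Hand-written port of Python's s.replace(old, new, count) WITH the count argument
-- (PySem.Str.replace has no count parameter). Exact Python semantics: at most `cnt`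
-- leftmost non-overlapping occurrences are replaced, a negative `cnt` replaces all,
-- and old = "" inserts `new` at the first `cnt` gaps (all gaps, incl. the end, if
-- cnt is negative or large enough).
def pyReplaceEmptyCnt (s new : List Char) (cnt : Int) : List Char :=
  if cnt = 0 then s else
  match s with
  | [] => new
  | c :: rest => new ++ c :: pyReplaceEmptyCnt rest new (cnt - 1)

def pyReplaceCntAux (s old new : List Char) (cnt : Int) : List Char :=
  if cnt = 0 then s else
  match s with
  | [] => []
  | c :: rest =>
    if old.isPrefixOf (c :: rest) then
      -- max old.length 1 = old.length here: this branch is only reached for old ≠ []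
      new ++ pyReplaceCntAux ((c :: rest).drop (max old.length 1)) old new (cnt - 1)
    else c :: pyReplaceCntAux rest old new cnt
termination_by s.length
decreasing_by
  · simp only [List.length_drop, List.length_cons]; omega
  · simp only [List.length_cons]; omega

def pyReplaceCnt (s old new : String) (cnt : Int) : String :=
  if old.toList.isEmpty then String.mk (pyReplaceEmptyCnt s.toList new.toList cnt)
  else String.mk (pyReplaceCntAux s.toList old.toList new.toList cnt)

-- Port of A. 'if not choices: choices = "x"' followed by 'pick = choices[0]' yields
-- "x" for an empty choices list and its first element otherwise, i.e. choices.headD "x".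
def replace_order (step : String) (sym : String) (div : Int) (full_vars : List String) (used_set : List String) (exclude : Bool) : String × List String :=
  let total : Int := (PySem.Str.count step sym : Int)
  let n_group : Int := PySem.Int.floordiv total div
  (PySem.List.pyRange 0 (n_group + 1) 1).foldl
    (fun st _ =>
      let choices := if exclude then full_vars.filter (fun v => !(PySem.Set.contains st.2 v)) else full_vars
      let pick := choices.headD "x"
      let used' := if exclude then PySem.Set.add st.2 pick else st.2
      (pyReplaceCnt st.1 sym pick div, used'))
    (step, used_set)

-- ===== PORT B =====
-- Source B's 's.split(sep, maxsplit)' for a NON-empty separator (Pre_ excludes sym = ""),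
-- returned as (first part, later parts): at most cnt splits, negative cnt splits at
-- every occurrence. 'max old.length 1' only totalizes the old = [] case, which Pre_
-- excludes; for old ≠ [] it is exactly old.length.
def splitCnt (s old : List Char) (cnt : Int) : List Char × List (List Char) :=
  if cnt = 0 then (s, []) else
  match s with
  | [] => ([], [])
  | c :: rest =>
    if old.isPrefixOf (c :: rest) then
      let r := splitCnt ((c :: rest).drop (max old.length 1)) old (cnt - 1)
      ([], r.1 :: r.2)
    else
      let r := splitCnt rest old cnt
      (c :: r.1, r.2)
termination_by s.length
decreasing_by
  · simp only [List.length_drop, List.length_cons]; omega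
  · simp only [List.length_cons]; omega

-- Python's sep.join(parts)
def pyJoin (sep : List Char) : List (List Char) → List Char
  | [] => []
  | h :: t => h ++ (t.map (fun x => sep ++ x)).flatten

-- Source B's 'p.join(step.split(sym, div))'
def splitJoin (s old new : String) (cnt : Int) : String :=
  let r := splitCnt s.toList old.toList cnt
  String.mk (pyJoin new.toList (r.1 :: r.2))

-- Source B's 'for v in full_vars: if v not in seen: seen.add(v); fresh.append(v)'
def freshVars : List String → List String → List String
  | [], _ => []
  | v :: vs, seen =>
    if PySem.Set.contains seen v then freshVars vs seen
    else v :: freshVars vs (PySem.Set.add seen v)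

def replace_order_alt (step : String) (sym : String) (div : Int) (full_vars : List String) (used_set : List String) (exclude : Bool) : String × List String :=
  let n : Int := PySem.Int.floordiv (PySem.Str.count step sym : Int) div + 1
  if n ≤ 0 then (step, used_set)
  else
    let picks : List String :=
      if exclude then
        let fresh := freshVars full_vars used_set
        fresh.take n.toNat ++ List.replicate (n - (fresh.length : Int)).toNat "x"
      else
        -- 'full_vars[0] if full_vars else "x"'
        List.replicate n.toNat (full_vars.headD "x")
    let used' := if exclude then picks.foldl PySem.Set.add used_set else used_set
    (picks.foldl (fun s p => splitJoin s sym p div) step, used')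

-- ===== PRECONDITION & SPEC =====
-- Pre_ excludes div = 0, on which Python A raises ZeroDivisionError (B too), and
-- sym = "", on which A still returns a value (str.replace inserts at gaps) but B's
-- natural split-based implementation raises ValueError ('empty separator').
def Pre_replace_order (step : String) (sym : String) (div : Int) (full_vars : List String) (used_set : List String) (exclude : Bool) : Prop := div ≠ 0 ∧ sym ≠ ""
instance (step : String) (sym : String) (div : Int) (full_vars : List String) (used_set : List String) (exclude : Bool) : Decidable (Pre_replace_order step sym div full_vars used_set exclude) := by unfold Pre_replace_order; infer_instance
def pvWitness_replace_order : String × String × Int × List String × List String × Bool := ("P(a) & Q(a)", "a", 1, ["u", "v"], [], true)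

def Spec_replace_order (step : String) (sym : String) (div : Int) (full_vars : List String) (used_set : List String) (exclude : Bool) (out : String × List String) : Prop := out = replace_order_alt step sym div full_vars used_set exclude
instance (step : String) (sym : String) (div : Int) (full_vars : List String) (used_set : List String) (exclude : Bool) (out : String × List String) : Decidable (Spec_replace_order step sym div full_vars used_set exclude out) := by unfold Spec_replace_order; infer_instance

-- ===== CLAIM (what is proved, stated in full; the proofs are below) =====
def Claim_equal_replace_order : Prop := ∀ (step : String) (sym : String) (div : Int) (full_vars : List String) (used_set : List String) (exclude : Bool), Dom_replace_order step sym div full_vars used_set exclude → Pre_replace_order step sym div full_vars used_set exclude → Spec_replace_order step sym div full_vars used_set exclude (replace_order step sym div full_vars used_set exclude)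

-- ===== LEMMAS AND PROOFS =====

-- split-then-join equals count-limited replace (both recursions use the same
-- 'max old.length 1' totalizer, so no hypothesis on old is needed here)
theorem splitCnt_join (old new : List Char) : ∀ (n : Nat) (s : List Char), s.length = n →
    ∀ (cnt : Int),
    pyJoin new ((splitCnt s old cnt).1 :: (splitCnt s old cnt).2) = pyReplaceCntAux s old new cnt := by
  intro n
  induction n using Nat.strong_induction_on with
  | _ n ih =>
    intro s hs cnt
    rw [splitCnt.eq_def, pyReplaceCntAux.eq_def]
    by_cases hc : cnt = 0
    · simp [hc, pyJoin]
    · rw [if_neg hc, if_neg hc]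
      cases s with
      | nil => simp [pyJoin]
      | cons c rest =>
        dsimp only
        by_cases hp : old.isPrefixOf (c :: rest)
        · rw [if_pos hp, if_pos hp]
          have := ih ((c :: rest).drop (max old.length 1)).length
            (by simp only [List.length_drop, List.length_cons] at hs ⊢; omega) _ rfl (cnt - 1)
          simp only [pyJoin] at this ⊢
          simp only [List.map_cons, List.flatten_cons, List.nil_append, ← this]
          simp
        · rw [if_neg hp, if_neg hp,
            ← ih rest.length (by simp only [List.length_cons] at hs; omega) rest rfl cnt]
          simp [pyJoin]

theorem splitJoin_eq (s old new : String) (cnt : Int) (h : old ≠ "") :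
    splitJoin s old new cnt = pyReplaceCnt s old new cnt := by
  have h' : old.toList.isEmpty = false := by
    simp only [List.isEmpty_eq_false_iff, ne_eq, String.toList_eq_nil_iff]
    exact h
  show String.mk (pyJoin new.toList
    ((splitCnt s.toList old.toList cnt).1 :: (splitCnt s.toList old.toList cnt).2)) = _
  rw [pyReplaceCnt, h', if_neg (by simp),
    splitCnt_join old.toList new.toList s.toList.length s.toList rfl]

-- A's pick, as a function of the current used set
def pickA (fv u : List String) : String :=
  (fv.filter (fun v => !(PySem.Set.contains u v))).headD "x"

-- A's loop body in the exclude = true case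
def bodyE (sym : String) (div : Int) (fv : List String) (st : String × List String) : String × List String :=
  (pyReplaceCnt st.1 sym (pickA fv st.2) div, PySem.Set.add st.2 (pickA fv st.2))

-- A's loop body in the exclude = false case
def bodyN (sym : String) (div : Int) (fv : List String) (st : String × List String) : String × List String :=
  (pyReplaceCnt st.1 sym (fv.headD "x") div, st.2)

-- the pick sequence of N rounds of A starting from used set u
def picksE (fv : List String) (N : Nat) (u : List String) : List String :=
  (freshVars fv u).take N ++ List.replicate (N - (freshVars fv u).length) "x"

theorem foldl_ignore {α β : Type} (l : List α) (f : β → β) (b : β) :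
    l.foldl (fun st _ => f st) b = f^[l.length] b := by
  induction l generalizing b with
  | nil => rfl
  | cons a l ih => simp [List.foldl_cons, ih, Function.iterate_succ_apply]

theorem freshVars_cons (v : String) (vs seen : List String) :
    freshVars (v :: vs) seen =
      if v ∈ seen then freshVars vs seen else v :: freshVars vs (seen ++ [v]) := by
  by_cases h : v ∈ seen
  · rw [if_pos h]
    simp only [freshVars]
    rw [if_pos (by simp [PySem.Set.contains_iff, h])]
  · rw [if_neg h]
    simp only [freshVars]
    rw [if_neg (by simp [PySem.Set.contains_iff, h]), PySem.Set.add_of_not_mem h]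

theorem pickA_eq (fv : List String) : ∀ u : List String, pickA fv u = (freshVars fv u).headD "x" := by
  induction fv with
  | nil => intro u; rfl
  | cons v vs ih =>
    intro u
    by_cases h : v ∈ u
    · unfold pickA
      rw [List.filter_cons, if_neg (by simp [PySem.Set.contains_iff, h]),
        freshVars_cons, if_pos h]
      exact ih u
    · unfold pickA
      rw [List.filter_cons, if_pos (by simp [PySem.Set.contains_iff, h]),
        freshVars_cons, if_neg h]
      rfl

theorem fresh_step (fv : List String) : ∀ (u : List String) (p : String) (rest : List String),
    freshVars fv u = p :: rest → freshVars fv (PySem.Set.add u p) = rest := by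
  induction fv with
  | nil => intro u p rest h; simp [freshVars] at h
  | cons v vs ih =>
    intro u p rest h
    by_cases hv : v ∈ u
    · rw [freshVars_cons, if_pos hv] at h
      have hm : v ∈ PySem.Set.add u p := by simp [PySem.Set.mem_add, hv]
      rw [freshVars_cons, if_pos hm]
      exact ih u p rest h
    · rw [freshVars_cons, if_neg hv] at h
      injection h with h1 h2
      subst h1
      have hm : v ∈ PySem.Set.add u v := by simp [PySem.Set.mem_add]
      rw [freshVars_cons, if_pos hm, PySem.Set.add_of_not_mem hv]
      exact h2

theorem fresh_nil (fv : List String) : ∀ (u : List String) (x : String),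
    freshVars fv u = [] → freshVars fv (PySem.Set.add u x) = [] := by
  induction fv with
  | nil => intro u x _; rfl
  | cons v vs ih =>
    intro u x h
    by_cases hv : v ∈ u
    · rw [freshVars_cons, if_pos hv] at h
      have hm : v ∈ PySem.Set.add u x := by simp [PySem.Set.mem_add, hv]
      rw [freshVars_cons, if_pos hm]
      exact ih u x h
    · rw [freshVars_cons, if_neg hv] at h
      simp at h

theorem picksE_succ (fv : List String) (N : Nat) (u : List String) :
    picksE fv (N + 1) u = pickA fv u :: picksE fv N (PySem.Set.add u (pickA fv u)) := by
  rw [pickA_eq]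
  rcases h : freshVars fv u with _ | ⟨p, rest⟩
  · simp [picksE, h, fresh_nil fv u _ h, List.replicate_succ]
  · simp [picksE, h, fresh_step fv u p rest h, Nat.succ_sub_succ]

theorem iterE (sym : String) (div : Int) (fv : List String) (N : Nat) :
    ∀ (u : List String) (s : String),
    (bodyE sym div fv)^[N] (s, u) =
      ((picksE fv N u).foldl (fun s p => pyReplaceCnt s sym p div) s,
       (picksE fv N u).foldl PySem.Set.add u) := by
  induction N with
  | zero => intro u s; simp [picksE]
  | succ N ih =>
    intro u s
    rw [Function.iterate_succ_apply, picksE_succ]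
    show (bodyE sym div fv)^[N] (pyReplaceCnt s sym (pickA fv u) div, PySem.Set.add u (pickA fv u)) = _
    rw [ih]
    simp [List.foldl_cons]

theorem iterN (sym : String) (div : Int) (fv : List String) (N : Nat) :
    ∀ (u : List String) (s : String),
    (bodyN sym div fv)^[N] (s, u) =
      ((List.replicate N (fv.headD "x")).foldl (fun s p => pyReplaceCnt s sym p div) s, u) := by
  induction N with
  | zero => intro u s; simp
  | succ N ih =>
    intro u s
    rw [Function.iterate_succ_apply, List.replicate_succ]
    show (bodyN sym div fv)^[N] (pyReplaceCnt s sym (fv.headD "x") div, u) = _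
    rw [ih]
    simp [List.foldl_cons]

-- ===== VERDICT (by name: the statement is the Claim_ definition above) =====
theorem replace_order_spec : Claim_equal_replace_order := by
  intro step sym div fv us exclude _hdom hpre
  unfold Spec_replace_order replace_order replace_order_alt
  have hrepl : ∀ (s p : String), splitJoin s sym p div = pyReplaceCnt s sym p div :=
    fun s p => splitJoin_eq s sym p div hpre.2
  simp only [hrepl]
  set n : Int := PySem.Int.floordiv ((PySem.Str.count step sym : Int)) div + 1 with hn
  have hlen : (PySem.List.pyRange 0 n 1).length = n.toNat := by
    simp [PySem.List.length_pyRange_one]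
  cases exclude
  · -- exclude = false
    rw [show (fun (st : String × List String) (_ : Int) =>
          let choices := if false = true then fv.filter (fun v => !(PySem.Set.contains st.2 v)) else fv
          let pick := choices.headD "x"
          let used' := if false = true then PySem.Set.add st.2 pick else st.2
          (pyReplaceCnt st.1 sym pick div, used')) =
        (fun st _ => bodyN sym div fv st) from rfl]
    rw [foldl_ignore, hlen, iterN]
    by_cases h : n ≤ 0
    · have : n.toNat = 0 := by omega
      simp [h, this]
    · simp [h]
  · -- exclude = true
    rw [show (fun (st : String × List String) (_ : Int) =>
          let choices := if true = true then fv.filter (fun v => !(PySem.Set.contains st.2 v)) else fv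
          let pick := choices.headD "x"
          let used' := if true = true then PySem.Set.add st.2 pick else st.2
          (pyReplaceCnt st.1 sym pick div, used')) =
        (fun st _ => bodyE sym div fv st) from rfl]
    rw [foldl_ignore, hlen, iterE]
    by_cases h : n ≤ 0
    · have : n.toNat = 0 := by omega
      simp [h, this, picksE]
    · have hpk : (freshVars fv us).take n.toNat ++
          List.replicate (n - ((freshVars fv us).length : Int)).toNat "x" = picksE fv n.toNat us := by
        have : (n - ((freshVars fv us).length : Int)).toNat = n.toNat - (freshVars fv us).length := by
          omega
        simp [picksE, this]
      rw [if_neg h]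
      simp only [hpk]
      simp
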